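-- pv_equiv track=rewrite | github.com/krzyswys/Algorythms-and-data-structures | Sorting problems/Array problems/RadiXSort(W).py | count_sort_letters
-- ===== SOURCE A (Python) =====
-- def count_sort_letters(A, column, max_len):
--   alf_size=26
--   n=len(A)
--
--   B   = [0] * n
--   C    = [0] * (alf_size + 1)
--   min_base = ord('a') - 1 #litery alfabetu + '0'
--
--   for item in A: # policz wystapienia
--     if column < len(item): #jak kolumna znajduje sie w stringu to wykonaj operacja a jak nie to dej 0
--         letter = ord(item[column]) - min_base #zlicz wg ascii do odpowiedniego mijesca, odejmij min prog aby było min=0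
--     else:
--         letter = 0
--     C[letter] += 1
--
--   for i in range(len(C)-1):   #zlicz wyrazy <=
--       C[i + 1] += C[i]
--
--   for item in reversed(A):
--
--     if column < len(item):
--         letter = ord(item[column]) - min_base
--     else:
--         letter = 0
--
--     B[C[letter] - 1] = item
--     C[letter] -= 1
--
--   return B
-- ===== SOURCE B (Python) =====
-- def count_sort_letters(A, column, max_len):
--   # Bucket sort: one forward pass appending each item to its letter bucket,
--   # then concatenate the buckets; no count array, prefix sums or reverse fill.
--   buckets = [[] for _ in range(27)]
--   for item in A:
--     if column < len(item):
--       buckets[ord(item[column]) - 96].append(item)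
--     else:
--       buckets[0].append(item)
--   out = []
--   for bucket in buckets:
--     out += bucket
--   return out
-- ===== Notes on version B (the rewrite author's own statement) =====
-- stated objective: simpler
-- what changed: Replaces counting sort (count array, prefix-sum pass, reverse placement into a preallocated output) by bucket sort: one forward pass appending each item to its letter bucket, then concatenating the buckets; same stable output; one pass over the data instead of two plus the prefix-sum loop. Pre_ excludes only inputs where both programs raise IndexError.
import Mathlib
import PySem

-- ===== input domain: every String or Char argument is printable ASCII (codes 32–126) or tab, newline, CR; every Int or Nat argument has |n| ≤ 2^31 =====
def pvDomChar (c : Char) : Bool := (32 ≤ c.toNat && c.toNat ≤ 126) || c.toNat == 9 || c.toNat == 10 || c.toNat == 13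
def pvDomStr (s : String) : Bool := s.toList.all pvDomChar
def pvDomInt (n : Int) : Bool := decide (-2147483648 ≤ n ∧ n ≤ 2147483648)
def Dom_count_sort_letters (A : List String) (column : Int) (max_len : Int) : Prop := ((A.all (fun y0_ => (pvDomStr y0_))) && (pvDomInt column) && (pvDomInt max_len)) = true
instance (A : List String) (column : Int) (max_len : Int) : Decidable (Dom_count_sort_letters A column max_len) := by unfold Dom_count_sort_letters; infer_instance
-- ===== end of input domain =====

-- B replaces A's counting sort (count array, prefix sums, reverse placement) by bucket sort
-- (one forward append pass, then bucket concatenation); same stable return value on Pre_.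

-- ===== PORT A =====
-- letter = ord(item[column]) - (ord('a')-1) if column < len(item) else 0
-- (the identical expression appears in both Pythons; pyGetD's default is never used under Pre_)
def pvLetter (column : Int) (item : String) : Int :=
  if column < PySem.List.len item.toList
  then ((PySem.List.pyGetD item.toList column ' ').toNat : Int) - 96
  else 0

def count_sort_letters (A : List String) (column : Int) (max_len : Int) : List String :=
  -- B = [0] * n : in Python the int 0s are placeholders, all overwritten on inputs Pre_ admits;
  -- "" is the placeholder here.  C = [0] * (alf_size + 1)
  let B0 : List String := List.replicate A.length ""
  let C0 : List Int := List.replicate (26 + 1) 0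
  -- for item in A: C[letter] += 1
  let C1 : List Int := A.foldl (fun C item =>
    PySem.List.pySetD C (pvLetter column item) (PySem.List.pyGetD C (pvLetter column item) 0 + 1)) C0
  -- for i in range(len(C)-1): C[i+1] += C[i]
  let C2 : List Int := (PySem.List.pyRange 0 (PySem.List.len C1 - 1) 1).foldl (fun C i =>
    PySem.List.pySetD C (i + 1) (PySem.List.pyGetD C (i + 1) 0 + PySem.List.pyGetD C i 0)) C1
  -- for item in reversed(A): B[C[letter] - 1] = item; C[letter] -= 1
  let BC : List String × List Int := A.reverse.foldl (fun BC item =>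
    (PySem.List.pySetD BC.1 (PySem.List.pyGetD BC.2 (pvLetter column item) 0 - 1) item,
     PySem.List.pySetD BC.2 (pvLetter column item) (PySem.List.pyGetD BC.2 (pvLetter column item) 0 - 1))) (B0, C2)
  BC.1

-- ===== PORT B =====
def count_sort_letters_alt (A : List String) (column : Int) (max_len : Int) : List String :=
  -- buckets = [[] for _ in range(27)]; for item in A: buckets[letter].append(item)
  let buckets : List (List String) := A.foldl (fun bs item =>
    PySem.List.pySetD bs (pvLetter column item) (PySem.List.pyGetD bs (pvLetter column item) [] ++ [item]))
    (List.replicate 27 [])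
  -- out = []; for bucket in buckets: out += bucket
  buckets.foldl (fun out bucket => out ++ bucket) []

-- ===== PRECONDITION & SPEC =====
def pvOk (column : Int) (item : String) : Bool :=
  if column < (item.toList.length : Int) then
    match PySem.List.pyGet? item.toList column with
    | some c => decide (69 ≤ c.toNat ∧ c.toNat ≤ 122)
    | none => false
  else true

-- Pre_ excludes exactly the inputs on which the Python A raises IndexError: some item with
-- column < len(item) whose column index is below -len(item), or whose column character has a
-- code outside 69..122, so that letter falls outside [-27, 26] and C[letter] raises
-- (B's buckets[letter] raises on exactly the same inputs).
def Pre_count_sort_letters (A : List String) (column : Int) (max_len : Int) : Prop :=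
  A.all (pvOk column) = true

instance (A : List String) (column : Int) (max_len : Int) : Decidable (Pre_count_sort_letters A column max_len) := by
  unfold Pre_count_sort_letters; infer_instance

def pvWitness_count_sort_letters : List String × Int × Int := (["ba", "ab", "b", ""], 0, 2)

def Spec_count_sort_letters (A : List String) (column : Int) (max_len : Int) (out : List String) : Prop := out = count_sort_letters_alt A column max_len
instance (A : List String) (column : Int) (max_len : Int) (out : List String) : Decidable (Spec_count_sort_letters A column max_len out) := by unfold Spec_count_sort_letters; infer_instance

-- ===== CLAIM (what is proved, stated in full; the proofs are below) =====
def Claim_equal_count_sort_letters : Prop := ∀ (A : List String) (column : Int) (max_len : Int), Dom_count_sort_letters A column max_len → Pre_count_sort_letters A column max_len → Spec_count_sort_letters A column max_len (count_sort_letters A column max_len)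

-- ===== LEMMAS AND PROOFS =====

-- The effective cell of the count array / bucket list an item goes to: Python's negative
-- indexing on a length-27 list sends letter to letter mod 27.
def pvCell (column : Int) (item : String) : Nat := ((pvLetter column item).emod 27).toNat

def pvCnt (column : Int) (P : List String) (k : Nat) : Nat :=
  P.countP (fun x => pvCell column x == k)

def pvFil (column : Int) (P : List String) (k : Nat) : List String :=
  P.filter (fun x => pvCell column x == k)

def pvLt (column : Int) (P : List String) (k : Nat) : Nat :=
  P.countP (fun x => decide (pvCell column x < k))

theorem pvCell_lt (column : Int) (x : String) : pvCell column x < 27 := by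
  unfold pvCell
  have h1 : 0 ≤ (pvLetter column x).emod 27 := Int.emod_nonneg _ (by omega)
  have h2 : (pvLetter column x).emod 27 < 27 := Int.emod_lt_of_pos _ (by omega)
  omega

theorem pvLetter_bounds (column : Int) (x : String) (h : pvOk column x = true) :
    -27 ≤ pvLetter column x ∧ pvLetter column x ≤ 26 := by
  unfold pvOk at h
  unfold pvLetter
  simp only [PySem.List.len_eq]
  split
  · rename_i hlt
    rw [if_pos hlt] at h
    cases hg : PySem.List.pyGet? x.toList column with
    | none => rw [hg] at h; simp at h
    | some c =>
      rw [hg] at h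
      simp only [decide_eq_true_eq] at h
      have : PySem.List.pyGetD x.toList column ' ' = c := by
        simp [PySem.List.pyGetD, hg]
      rw [this]; omega
  · omega

-- wrap lemmas: on a length-27 list, Python indexing with letter ∈ [-27, 26] is pure
-- get/set at cell (letter mod 27)
theorem pyGetD_wrap {α : Type} (C : List α) (hC : C.length = 27) (l : Int)
    (h1 : -27 ≤ l) (h2 : l ≤ 26) (d : α) :
    PySem.List.pyGetD C l d = C.getD (l.emod 27).toNat d := by
  unfold PySem.List.pyGetD PySem.List.pyGet? PySem.List.pyIdx?
  by_cases h0 : 0 ≤ l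
  · rw [if_pos h0, if_pos (by omega)]
    have : l.emod 27 = l := Int.emod_eq_of_lt h0 (by omega)
    rw [this]
    simp [List.getD_eq_getElem?_getD]
  · rw [if_neg h0, if_pos (by omega)]
    have he : l.emod 27 = l + 27 := by
      have : (l + 27 * 1).emod 27 = l.emod 27 := Int.add_mul_emod_self_left l 27 1
      have h2 : (l + 27 * 1).emod 27 = l + 27 := Int.emod_eq_of_lt (by omega) (by omega)
      omega
    have : (l.emod 27).toNat = C.length - (-l).toNat := by omega
    rw [this]
    simp [List.getD_eq_getElem?_getD]

theorem pySetD_wrap {α : Type} (C : List α) (hC : C.length = 27) (l : Int)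
    (h1 : -27 ≤ l) (h2 : l ≤ 26) (v : α) :
    PySem.List.pySetD C l v = C.set (l.emod 27).toNat v := by
  unfold PySem.List.pySetD PySem.List.pySet? PySem.List.pyIdx?
  by_cases h0 : 0 ≤ l
  · rw [if_pos h0, if_pos (by omega)]
    have : l.emod 27 = l := Int.emod_eq_of_lt h0 (by omega)
    rw [this]; simp
  · rw [if_neg h0, if_pos (by omega)]
    have he : l.emod 27 = l + 27 := by
      have : (l + 27 * 1).emod 27 = l.emod 27 := Int.add_mul_emod_self_left l 27 1
      have h2 : (l + 27 * 1).emod 27 = l + 27 := Int.emod_eq_of_lt (by omega) (by omega)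
      omega
    have : C.length - (-l).toNat = (l.emod 27).toNat := by omega
    rw [this]; simp

theorem getD_set_ne {α : Type} (l : List α) (m k : Nat) (v d : α) (h : k ≠ m) :
    (l.set m v).getD k d = l.getD k d := by
  simp [List.getD_eq_getElem?_getD, List.getElem?_set_ne (by omega : m ≠ k)]

theorem getD_set_self {α : Type} (l : List α) (m : Nat) (v d : α) (h : m < l.length) :
    (l.set m v).getD m d = v := by
  simp [List.getD_eq_getElem?_getD, h]

theorem getD_append_right {α : Type} (l l' : List α) (n : Nat) (d : α) :
    (l ++ l').getD (l.length + n) d = l'.getD n d := by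
  simp [List.getD_eq_getElem?_getD, List.getElem?_append_right (by omega : l.length ≤ l.length + n)]

-- counting pass (A's first loop)
theorem loop1_spec (column : Int) (P : List String) : ∀ (C : List Int),
    (∀ x ∈ P, pvOk column x = true) → C.length = 27 →
    (P.foldl (fun C item =>
      PySem.List.pySetD C (pvLetter column item) (PySem.List.pyGetD C (pvLetter column item) 0 + 1)) C).length = 27 ∧
    ∀ k, k < 27 →
    (P.foldl (fun C item =>
      PySem.List.pySetD C (pvLetter column item) (PySem.List.pyGetD C (pvLetter column item) 0 + 1)) C).getD k 0
      = C.getD k 0 + (pvCnt column P k : Int) := by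
  induction P with
  | nil => intro C _ hC; exact ⟨hC, fun k _ => by simp [pvCnt]⟩
  | cons x P ih =>
    intro C hok hC
    have hx := hok x (List.mem_cons_self ..)
    have hb := pvLetter_bounds column x hx
    simp only [List.foldl_cons]
    rw [pyGetD_wrap C hC _ hb.1 hb.2, pySetD_wrap C hC _ hb.1 hb.2]
    simp only [show ((pvLetter column x).emod 27).toNat = pvCell column x from rfl]
    have hC' : (C.set (pvCell column x) (C.getD (pvCell column x) 0 + 1)).length = 27 := by
      simpa using hC
    obtain ⟨hlen, hval⟩ := ih (C.set (pvCell column x) (C.getD (pvCell column x) 0 + 1))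
      (fun y hy => hok y (List.mem_cons_of_mem _ hy)) hC'
    refine ⟨hlen, fun k hk => ?_⟩
    rw [hval k hk]
    unfold pvCnt
    simp only [List.countP_cons]
    by_cases h : pvCell column x = k
    · rw [h, getD_set_self _ _ _ _ (by omega)]
      simp; omega
    · rw [getD_set_ne _ _ _ _ _ (fun hh => h hh.symm)]
      simp [beq_false_of_ne h]

-- prefix-sum pass (A's second loop)
theorem loop2_spec (column : Int) (m : Nat) (hm : m ≤ 26) : ∀ (C : List Int), C.length = 27 →
    ((PySem.List.pyRange 0 (m : Int) 1).foldl (fun C i =>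
      PySem.List.pySetD C (i + 1) (PySem.List.pyGetD C (i + 1) 0 + PySem.List.pyGetD C i 0)) C).length = 27 ∧
    ∀ j, j < 27 →
    ((PySem.List.pyRange 0 (m : Int) 1).foldl (fun C i =>
      PySem.List.pySetD C (i + 1) (PySem.List.pyGetD C (i + 1) 0 + PySem.List.pyGetD C i 0)) C).getD j 0
      = if j ≤ m then ((List.range (j+1)).map (fun i => C.getD i 0)).sum else C.getD j 0 := by
  induction m with
  | zero =>
    intro C hC
    rw [PySem.List.pyRange_one_eq_nil (by omega)]
    refine ⟨hC, fun j hj => ?_⟩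
    simp only [List.foldl_nil]
    by_cases h0 : j = 0
    · subst h0; simp [List.range_one]
    · rw [if_neg (by omega)]
  | succ m ih =>
    intro C hC
    have hm' : m ≤ 26 := by omega
    have hcast : ((m+1 : Nat) : Int) = (m : Int) + 1 := by push_cast; ring
    rw [hcast, PySem.List.pyRange_one_succ_right (by omega), List.foldl_append,
        List.foldl_cons, List.foldl_nil]
    obtain ⟨hlen, hval⟩ := ih hm' C hC
    have e1' : ((m : Int) + 1).emod 27 = (m : Int) + 1 := Int.emod_eq_of_lt (by omega) (by omega)
    have e2' : ((m : Int)).emod 27 = (m : Int) := Int.emod_eq_of_lt (by omega) (by omega)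
    have e1 : (((m : Int) + 1).emod 27).toNat = m + 1 := by rw [e1']; omega
    have e2 : (((m : Int)).emod 27).toNat = m := by rw [e2']; omega
    rw [pySetD_wrap _ hlen _ (by omega) (by omega),
        pyGetD_wrap _ hlen ((m : Int) + 1) (by omega) (by omega),
        pyGetD_wrap _ hlen ((m : Int)) (by omega) (by omega), e1, e2]
    refine ⟨by simpa using hlen, fun j hj => ?_⟩
    by_cases hje : j = m + 1
    · subst hje
      rw [getD_set_self _ _ _ _ (by omega), if_pos (le_refl _)]
      rw [hval (m+1) (by omega), if_neg (by omega), hval m (by omega), if_pos (le_refl _)]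
      rw [List.range_succ (n := m + 1), List.map_append, List.sum_append]
      simp; ring
    · rw [getD_set_ne _ _ _ _ _ hje, hval j hj]
      by_cases hjm : j ≤ m
      · rw [if_pos hjm, if_pos (by omega)]
      · rw [if_neg hjm, if_neg (by omega)]

theorem pvFil_len (column : Int) (P : List String) (k : Nat) :
    (pvFil column P k).length = pvCnt column P k := by
  unfold pvFil pvCnt; rw [List.countP_eq_length_filter]

-- reverse placement pass (A's third loop)
theorem loop3_spec (column : Int) (b : Nat → Nat) :
    ∀ (P : List String) (B : List String) (C : List Int),
    (∀ x ∈ P, pvOk column x = true) →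
    C.length = 27 →
    (∀ k, k < 27 → C.getD k 0 = ((b k + pvCnt column P k : Nat) : Int)) →
    (∀ k j, k < j → j < 27 → b k + pvCnt column P k ≤ b j) →
    (∀ k, k < 27 → b k + pvCnt column P k ≤ B.length) →
    (P.reverse.foldl (fun BC item =>
      (PySem.List.pySetD BC.1 (PySem.List.pyGetD BC.2 (pvLetter column item) 0 - 1) item,
       PySem.List.pySetD BC.2 (pvLetter column item) (PySem.List.pyGetD BC.2 (pvLetter column item) 0 - 1)))
      ((B, C) : List String × List Int)).1.length = B.length ∧
    (∀ k, k < 27 → ∀ j, j < pvCnt column P k →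
      (P.reverse.foldl (fun BC item =>
        (PySem.List.pySetD BC.1 (PySem.List.pyGetD BC.2 (pvLetter column item) 0 - 1) item,
         PySem.List.pySetD BC.2 (pvLetter column item) (PySem.List.pyGetD BC.2 (pvLetter column item) 0 - 1)))
        ((B, C) : List String × List Int)).1.getD (b k + j) "" = (pvFil column P k).getD j "") ∧
    (∀ i, (∀ k, k < 27 → ¬(b k ≤ i ∧ i < b k + pvCnt column P k)) →
      (P.reverse.foldl (fun BC item =>
        (PySem.List.pySetD BC.1 (PySem.List.pyGetD BC.2 (pvLetter column item) 0 - 1) item,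
         PySem.List.pySetD BC.2 (pvLetter column item) (PySem.List.pyGetD BC.2 (pvLetter column item) 0 - 1)))
        ((B, C) : List String × List Int)).1.getD i "" = B.getD i "") := by
  intro P
  induction P using List.reverseRecOn with
  | nil =>
    intro B C hok hC hCval hmono hbnd
    refine ⟨rfl, fun k hk j hj => ?_, fun i _ => rfl⟩
    simp [pvCnt] at hj
  | append_singleton P x ih =>
    intro B C hok hC hCval hmono hbnd
    have hx := hok x (by simp)
    have hb := pvLetter_bounds column x hx
    have hk0lt : pvCell column x < 27 := pvCell_lt column x
    have hcnt_eq : ∀ k, pvCnt column (P ++ [x]) k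
        = pvCnt column P k + (if pvCell column x = k then 1 else 0) := by
      intro k
      unfold pvCnt
      rw [List.countP_append]
      by_cases h : pvCell column x = k
      · simp [List.countP_cons, beq_iff_eq.mpr h, h]
      · simp [List.countP_cons, beq_false_of_ne h, h]
    have hfil_eq : ∀ k, pvFil column (P ++ [x]) k
        = pvFil column P k ++ (if pvCell column x = k then [x] else []) := by
      intro k
      unfold pvFil
      rw [List.filter_append]
      by_cases h : pvCell column x = k
      · simp [beq_iff_eq.mpr h, h]
      · simp [beq_false_of_ne h, h]
    have hcnt0 : pvCnt column (P ++ [x]) (pvCell column x) = pvCnt column P (pvCell column x) + 1 := by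
      rw [hcnt_eq]; simp
    simp only [List.reverse_append, List.reverse_singleton, List.singleton_append,
      List.foldl_cons]
    rw [pyGetD_wrap C hC _ hb.1 hb.2, pySetD_wrap C hC _ hb.1 hb.2]
    simp only [show ((pvLetter column x).emod 27).toNat = pvCell column x from rfl]
    have hv : C.getD (pvCell column x) 0
        = ((b (pvCell column x) + pvCnt column (P ++ [x]) (pvCell column x) : Nat) : Int) :=
      hCval _ hk0lt
    have hpos : C.getD (pvCell column x) 0 - 1
        = ((b (pvCell column x) + pvCnt column P (pvCell column x) : Nat) : Int) := by
      rw [hv, hcnt0]; push_cast; ring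
    rw [hpos, PySem.List.pySetD_natCast]
    have hposB : b (pvCell column x) + pvCnt column P (pvCell column x) < B.length := by
      have := hbnd _ hk0lt; omega
    obtain ⟨ih1, ih2, ih3⟩ := ih (B.set (b (pvCell column x) + pvCnt column P (pvCell column x)) x)
      (C.set (pvCell column x) ((b (pvCell column x) + pvCnt column P (pvCell column x) : Nat) : Int))
      (fun y hy => hok y (by simp [hy]))
      (by simpa using hC)
      (by
        intro k hk
        by_cases h : k = pvCell column x
        · subst h; rw [getD_set_self _ _ _ _ (by omega)]
        · rw [getD_set_ne _ _ _ _ _ h, hCval k hk, hcnt_eq k, if_neg (fun hh => h hh.symm)]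
          simp)
      (by
        intro k j hkj hj
        have := hmono k j hkj hj
        have h2 := hcnt_eq k
        omega)
      (by
        intro k hk
        have := hbnd k hk
        have h2 := hcnt_eq k
        simp only [List.length_set]
        omega)
    refine ⟨by rw [ih1]; simp, fun k hk j hj => ?_, fun i hi => ?_⟩
    · by_cases hkk : pvCell column x = k
      · subst hkk
        by_cases hjc : j < pvCnt column P (pvCell column x)
        · rw [ih2 _ hk j hjc, hfil_eq _, if_pos rfl,
              List.getD_append _ _ _ _ (by rw [pvFil_len]; omega)]
        · have hj' : j = pvCnt column P (pvCell column x) := by rw [hcnt0] at hj; omega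
          subst hj'
          rw [ih3 (b (pvCell column x) + pvCnt column P (pvCell column x)) (by
            intro k' hk' hcontra
            rcases Nat.lt_trichotomy k' (pvCell column x) with h | h | h
            · have := hmono k' (pvCell column x) h hk
              have h2 := hcnt_eq k'
              omega
            · subst h; omega
            · have := hmono (pvCell column x) k' h hk'
              omega)]
          rw [getD_set_self _ _ _ _ hposB, hfil_eq _, if_pos rfl]
          rw [show pvCnt column P (pvCell column x)
                = (pvFil column P (pvCell column x)).length + 0 by rw [pvFil_len]; omega]
          rw [getD_append_right]
          rfl
      · have hne : pvCnt column (P ++ [x]) k = pvCnt column P k := by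
          rw [hcnt_eq, if_neg hkk]; omega
        rw [ih2 k hk j (by omega), hfil_eq k, if_neg hkk, List.append_nil]
    · have hi' : ∀ k, k < 27 → ¬(b k ≤ i ∧ i < b k + pvCnt column P k) := by
        intro k hk ⟨h1, h2⟩
        have h3 := hcnt_eq k
        exact hi k hk ⟨h1, by omega⟩
      rw [ih3 i hi']
      have hipos : i ≠ b (pvCell column x) + pvCnt column P (pvCell column x) := by
        intro hh
        exact hi _ hk0lt ⟨by omega, by omega⟩
      rw [getD_set_ne _ _ _ _ _ hipos]

-- B's bucket pass
theorem loopB_spec (column : Int) (P : List String) : ∀ (bs : List (List String)),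
    (∀ x ∈ P, pvOk column x = true) → bs.length = 27 →
    (P.foldl (fun bs item =>
      PySem.List.pySetD bs (pvLetter column item) (PySem.List.pyGetD bs (pvLetter column item) [] ++ [item])) bs).length = 27 ∧
    ∀ k, k < 27 →
    (P.foldl (fun bs item =>
      PySem.List.pySetD bs (pvLetter column item) (PySem.List.pyGetD bs (pvLetter column item) [] ++ [item])) bs).getD k []
      = bs.getD k [] ++ pvFil column P k := by
  induction P with
  | nil => intro bs _ hb; exact ⟨hb, fun k _ => by simp [pvFil]⟩
  | cons x P ih =>
    intro bs hok hlen
    have hx := hok x (List.mem_cons_self ..)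
    have hb := pvLetter_bounds column x hx
    simp only [List.foldl_cons]
    rw [pyGetD_wrap bs hlen _ hb.1 hb.2, pySetD_wrap bs hlen _ hb.1 hb.2]
    simp only [show ((pvLetter column x).emod 27).toNat = pvCell column x from rfl]
    have hlen' : (bs.set (pvCell column x) (bs.getD (pvCell column x) [] ++ [x])).length = 27 := by
      simpa using hlen
    obtain ⟨hl2, hval⟩ := ih (bs.set (pvCell column x) (bs.getD (pvCell column x) [] ++ [x]))
      (fun y hy => hok y (List.mem_cons_of_mem _ hy)) hlen'
    refine ⟨hl2, fun k hk => ?_⟩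
    rw [hval k hk]
    unfold pvFil
    simp only [List.filter_cons]
    by_cases h : pvCell column x = k
    · rw [h, getD_set_self _ _ _ _ (by omega)]
      simp [List.append_assoc]
    · rw [getD_set_ne _ _ _ _ _ (fun hh => h hh.symm)]
      simp [beq_false_of_ne h]

-- arithmetic on the counters
theorem pvLt_succ (column : Int) (P : List String) (k : Nat) :
    pvLt column P (k+1) = pvLt column P k + pvCnt column P k := by
  induction P with
  | nil => rfl
  | cons x P ih =>
    unfold pvLt pvCnt at *
    simp only [List.countP_cons]
    rcases Nat.lt_trichotomy (pvCell column x) k with h | h | h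
    · rw [show decide (pvCell column x < k + 1) = true from decide_eq_true (by omega),
          show decide (pvCell column x < k) = true from decide_eq_true h,
          show (pvCell column x == k) = false from beq_false_of_ne (by omega)]
      simp only [if_false, Bool.false_eq_true]
      omega
    · rw [show decide (pvCell column x < k + 1) = true from decide_eq_true (by omega),
          show decide (pvCell column x < k) = false from decide_eq_false (by omega),
          show (pvCell column x == k) = true from beq_iff_eq.mpr h]
      simp only [if_false, Bool.false_eq_true]
      omega
    · rw [show decide (pvCell column x < k + 1) = false from decide_eq_false (by omega),
          show decide (pvCell column x < k) = false from decide_eq_false (by omega),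
          show (pvCell column x == k) = false from beq_false_of_ne (by omega)]
      simp only [if_false, Bool.false_eq_true]
      omega

theorem pvLt_zero (column : Int) (P : List String) : pvLt column P 0 = 0 := by
  unfold pvLt; simp

theorem pvLt_27 (column : Int) (P : List String) : pvLt column P 27 = P.length := by
  unfold pvLt
  exact List.countP_eq_length.mpr (fun x _ => decide_eq_true (pvCell_lt column x))

theorem pvLt_mono (column : Int) (P : List String) (k j : Nat) (h : k ≤ j) :
    pvLt column P k ≤ pvLt column P j := by
  unfold pvLt
  exact List.countP_mono_left (fun x _ hx => by
    simp only [decide_eq_true_eq] at *; omega)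

theorem pvCover (column : Int) (P : List String) : ∀ (m : Nat) (i : Nat), i < pvLt column P m →
    ∃ k, k < m ∧ pvLt column P k ≤ i ∧ i < pvLt column P k + pvCnt column P k := by
  intro m
  induction m with
  | zero => intro i hi; rw [pvLt_zero] at hi; omega
  | succ m ih =>
    intro i hi
    by_cases h : pvLt column P m ≤ i
    · exact ⟨m, by omega, h, by rw [← pvLt_succ]; exact hi⟩
    · obtain ⟨k, hk, h1, h2⟩ := ih i (by omega)
      exact ⟨k, by omega, h1, h2⟩

-- flatten of the first k buckets has length pvLt k
theorem flat_len (column : Int) (A : List String) : ∀ (k : Nat),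
    (((List.range k).map (fun k => pvFil column A k)).flatten).length = pvLt column A k := by
  intro k
  induction k with
  | zero => simp [pvLt_zero]
  | succ k ih =>
    rw [List.range_succ]
    simp only [List.map_append, List.flatten_append, List.length_append, ih, pvLt_succ]
    simp [pvFil_len]

-- indexing the flattened buckets
theorem flat_getD (column : Int) (A : List String) (k j : Nat) (hk : k < 27)
    (hj : j < pvCnt column A k) :
    (((List.range 27).map (fun k => pvFil column A k)).flatten).getD (pvLt column A k + j) ""
      = (pvFil column A k).getD j "" := by
  have hsplit : (27 : Nat) = (k + 1) + (26 - k) := by omega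
  rw [hsplit, List.range_add, List.range_succ]
  simp only [List.map_append, List.flatten_append]
  rw [List.append_assoc]
  have hlen : (((List.range k).map (fun k => pvFil column A k)).flatten).length = pvLt column A k :=
    flat_len column A k
  rw [← hlen, getD_append_right]
  simp only [List.map_cons, List.map_nil, List.flatten_cons, List.flatten_nil, List.append_nil]
  rw [List.getD_append _ _ _ _ (by rw [pvFil_len]; omega)]

-- sum of the first t counters
theorem sum_cnt (column : Int) (A : List String) : ∀ (t : Nat),
    ((List.range t).map (fun i => (pvCnt column A i : Int))).sum = (pvLt column A t : Int) := by
  intro t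
  induction t with
  | zero => simp [pvLt_zero]
  | succ t ih =>
    rw [List.range_succ]
    simp only [List.map_append, List.sum_append, ih, pvLt_succ]
    push_cast; simp

-- B's port returns the flattened buckets
theorem alt_eq_flatten (A : List String) (column : Int) (max_len : Int)
    (hok : ∀ x ∈ A, pvOk column x = true) :
    count_sort_letters_alt A column max_len
      = ((List.range 27).map (fun k => pvFil column A k)).flatten := by
  unfold count_sort_letters_alt
  obtain ⟨hlen, hval⟩ := loopB_spec column A (List.replicate 27 []) hok (by simp)
  rw [PySem.List.foldl_append_eq_flatten, List.nil_append]
  congr 1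
  apply List.ext_getElem (by rw [hlen]; simp)
  intro i h1 h2
  rw [hlen] at h1
  rw [← List.getD_eq_getElem _ [] (by omega), hval i h1,
      List.getD_replicate _ (by omega), List.nil_append, List.getElem_map, List.getElem_range]

-- ===== VERDICT (by name: the statement is the Claim_ definition above) =====
theorem count_sort_letters_spec : Claim_equal_count_sort_letters := by
  intro A column max_len _hdom hpre
  unfold Spec_count_sort_letters
  have hok : ∀ x ∈ A, pvOk column x = true := by
    unfold Pre_count_sort_letters at hpre
    simpa [List.all_eq_true] using hpre
  rw [alt_eq_flatten A column max_len hok]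
  simp only [count_sort_letters]
  obtain ⟨hC1len, hC1val⟩ := loop1_spec column A (List.replicate (26+1) (0:Int)) hok (by simp)
  have hrange : PySem.List.len (A.foldl (fun C item =>
      PySem.List.pySetD C (pvLetter column item) (PySem.List.pyGetD C (pvLetter column item) 0 + 1))
      (List.replicate (26+1) (0:Int))) - 1 = ((26 : Nat) : Int) := by
    rw [PySem.List.len_eq, hC1len]; norm_num
  rw [hrange]
  obtain ⟨hC2len, hC2val⟩ := loop2_spec column 26 (le_refl _) _ hC1len
  have hC2 : ∀ k, k < 27 →
      ((PySem.List.pyRange 0 ((26 : Nat) : Int) 1).foldl (fun C i =>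
        PySem.List.pySetD C (i + 1) (PySem.List.pyGetD C (i + 1) 0 + PySem.List.pyGetD C i 0))
        (A.foldl (fun C item =>
          PySem.List.pySetD C (pvLetter column item) (PySem.List.pyGetD C (pvLetter column item) 0 + 1))
          (List.replicate (26+1) (0:Int)))).getD k 0
      = (((fun k => pvLt column A k) k + pvCnt column A k : Nat) : Int) := by
    intro k hk
    rw [hC2val k hk, if_pos (by omega)]
    have hmap : ∀ i ∈ List.range (k+1),
        (A.foldl (fun C item =>
          PySem.List.pySetD C (pvLetter column item) (PySem.List.pyGetD C (pvLetter column item) 0 + 1))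
          (List.replicate (26+1) (0:Int))).getD i 0 = (pvCnt column A i : Int) := by
      intro i hi
      have hi' : i < 27 := by simp at hi; omega
      rw [hC1val i hi', List.getD_replicate _ (by omega)]
      simp
    rw [List.map_congr_left hmap, sum_cnt column A (k+1), pvLt_succ]
  obtain ⟨h31, h32, h33⟩ := loop3_spec column (fun k => pvLt column A k) A
    (List.replicate A.length "") _ hok hC2len hC2
    (by
      intro k j hkj hj
      have h1 := pvLt_succ column A k
      have h2 := pvLt_mono column A (k+1) j (by omega)
      simp only []
      omega)
    (by
      intro k hk
      have h1 := pvLt_succ column A k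
      have h2 := pvLt_mono column A (k+1) 27 (by omega)
      have h3 := pvLt_27 column A
      simp only [List.length_replicate]
      omega)
  apply List.ext_getElem
  · rw [h31, flat_len column A 27, pvLt_27]
    simp
  · intro i hL hR
    have hiA : i < A.length := by rw [h31] at hL; simpa using hL
    obtain ⟨k, hk27, hk1, hk2⟩ := pvCover column A 27 i (by rw [pvLt_27]; exact hiA)
    have hj : i - pvLt column A k < pvCnt column A k := by omega
    rw [← List.getD_eq_getElem _ "" hL, ← List.getD_eq_getElem _ "" hR]
    rw [show i = pvLt column A k + (i - pvLt column A k) from by omega]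
    rw [h32 k hk27 _ hj, flat_getD column A k _ hk27 hj]
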